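-- pv_equiv track=rewrite | github.com/Drjay806/PRO_B_GAN_KG | preprocessing/fetch_metadata.py | extract_entities_by_type
-- ===== SOURCE A (Python) =====
-- from typing import Dict, Set
--
-- def extract_entities_by_type(entity2id: Dict[str, int]) -> Dict[str, Set[str]]:
--     by_type = {}
--     for entity_name in entity2id.keys():
--         if entity_name.startswith("protein"):
--             entity_type = "protein"
--         elif entity_name.startswith("go"):
--             entity_type = "go"
--         elif entity_name.startswith("pathway"):
--             entity_type = "pathway"
--         elif entity_name.startswith("disease"):
--             entity_type = "disease"
--         elif entity_name.startswith("side_effect"):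
--             entity_type = "side_effect"
--         else:
--             entity_type = "other"
--
--         if entity_type not in by_type:
--             by_type[entity_type] = set()
--         by_type[entity_type].add(entity_name)
--
--     return by_type
-- ===== SOURCE B (Python) =====
-- def extract_entities_by_type(entity2id):
--     prefixes = ["protein", "go", "pathway", "disease", "side_effect"]
--
--     def classify(name):
--         for p in prefixes:
--             if name.startswith(p):
--                 return p
--         return "other"
--
--     names = list(entity2id)
--     order = []
--     for n in names:
--         t = classify(n)
--         if t not in order:
--             order.append(t)
--     return {t: {n for n in names if classify(n) == t} for t in order}
-- ===== Notes on version B (the rewrite author's own statement) =====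
-- stated objective: alternative
-- what changed: Replaces the single-pass classify-and-insert into a dict of sets (if/elif chain, create-bucket-then-add mutation) by a group-by: a prefix-table classifier, one pass that records the distinct types in first-occurrence order, then a dict comprehension building each bucket as a set comprehension filtering the key list.
import Mathlib
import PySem

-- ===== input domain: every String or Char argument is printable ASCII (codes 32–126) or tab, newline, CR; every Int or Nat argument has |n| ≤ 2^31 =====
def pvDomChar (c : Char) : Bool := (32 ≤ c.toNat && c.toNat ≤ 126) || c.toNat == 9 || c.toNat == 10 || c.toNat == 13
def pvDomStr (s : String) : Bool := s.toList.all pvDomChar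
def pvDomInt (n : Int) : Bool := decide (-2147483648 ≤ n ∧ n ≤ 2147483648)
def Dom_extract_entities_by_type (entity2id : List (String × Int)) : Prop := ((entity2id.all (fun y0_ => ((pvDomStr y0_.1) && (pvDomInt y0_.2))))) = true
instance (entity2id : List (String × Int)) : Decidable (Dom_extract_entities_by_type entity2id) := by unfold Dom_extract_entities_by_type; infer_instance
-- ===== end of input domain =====

-- B replaces A's single-pass classify-and-insert into a dict of sets by a group-by:
-- a prefix-table classifier, one pass recording distinct types in first-occurrence
-- order, then a bucket per type built by filtering the key list (objective: alternative).


-- ===== PORT A =====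
-- A's if/elif chain classifying one entity name
def pvClassifyA (entity_name : String) : String :=
  if PySem.Str.startswith entity_name "protein" then "protein"
  else if PySem.Str.startswith entity_name "go" then "go"
  else if PySem.Str.startswith entity_name "pathway" then "pathway"
  else if PySem.Str.startswith entity_name "disease" then "disease"
  else if PySem.Str.startswith entity_name "side_effect" then "side_effect"
  else "other"

-- A's loop body: create the bucket if absent, then add the name to it
def pvStepA (by_type : PySem.Dict String (PySem.Set String)) (entity_name : String) :
    PySem.Dict String (PySem.Set String) :=
  let entity_type := pvClassifyA entity_name
  let by_type := if by_type.contains entity_type then by_type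
                 else by_type.insert entity_type PySem.Set.empty
  by_type.modify entity_type PySem.Set.empty (fun s => s.add entity_name)

def extract_entities_by_type (entity2id : List (String × Int)) : List (String × List String) :=
  -- iteration over entity2id.keys(): the distinct keys in insertion order
  ((PySem.List.dedup (entity2id.map (fun p => p.1))).foldl pvStepA (PySem.Dict.mk [])).items

-- ===== PORT B =====
def pvPrefixes : List String := ["protein", "go", "pathway", "disease", "side_effect"]

-- Source B's classify: first matching prefix, else "other"
def pvClassify (n : String) : String :=
  (pvPrefixes.find? (fun p => PySem.Str.startswith n p)).getD "other"

-- Source B's first loop body: record a type the first time it appears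
def pvStepOrder (acc : List String) (n : String) : List String :=
  if acc.contains (pvClassify n) then acc else acc ++ [pvClassify n]

def extract_entities_by_type_alt (entity2id : List (String × Int)) : List (String × List String) :=
  let names := PySem.List.dedup (entity2id.map (fun p => p.1))
  let order := names.foldl pvStepOrder []
  order.map (fun t => (t, PySem.Set.ofList (names.filter (fun n => pvClassify n == t))))

-- ===== PRECONDITION & SPEC =====
def Spec_extract_entities_by_type (entity2id : List (String × Int)) (out : List (String × List String)) : Prop := out = extract_entities_by_type_alt entity2id
instance (entity2id : List (String × Int)) (out : List (String × List String)) : Decidable (Spec_extract_entities_by_type entity2id out) := by unfold Spec_extract_entities_by_type; infer_instance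

-- ===== CLAIM (what is proved, stated in full; the proofs are below) =====
def Claim_equal_extract_entities_by_type : Prop := ∀ (entity2id : List (String × Int)), Dom_extract_entities_by_type entity2id → Spec_extract_entities_by_type entity2id (extract_entities_by_type entity2id)

-- ===== LEMMAS AND PROOFS =====

theorem pvClassifyA_eq (n : String) : pvClassifyA n = pvClassify n := by
  unfold pvClassifyA pvClassify pvPrefixes
  simp only [List.find?]
  split_ifs <;> simp_all

-- membership in the foldl that records types in first-occurrence order
theorem pv_mem_foldl_order (p : List String) : ∀ (acc : List String) (t : String),
    t ∈ p.foldl pvStepOrder acc ↔ t ∈ acc ∨ ∃ n ∈ p, pvClassify n = t := by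
  induction p with
  | nil => simp
  | cons m p ih =>
    intro acc t
    rw [List.foldl_cons, ih]
    have hstep : t ∈ pvStepOrder acc m ↔ t ∈ acc ∨ pvClassify m = t := by
      unfold pvStepOrder
      by_cases hm : (pvClassify m) ∈ acc
      · simp only [List.contains_eq_mem, hm, decide_true, if_true]
        constructor
        · exact Or.inl
        · rintro (h | rfl)
          · exact h
          · exact hm
      · simp only [List.contains_eq_mem, hm, decide_false, Bool.false_eq_true, if_false,
          List.mem_append, List.mem_singleton]
        constructor
        · rintro (h | h)
          exacts [Or.inl h, Or.inr h.symm]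
        · rintro (h | h)
          exacts [Or.inl h, Or.inr h.symm]
    rw [hstep]
    constructor
    · rintro ((h | h) | ⟨n, hn, hc⟩)
      exacts [Or.inl h, Or.inr ⟨m, by simp, h⟩, Or.inr ⟨n, by simp [hn], hc⟩]
    · rintro (h | ⟨n, hn, hc⟩)
      · exact Or.inl (Or.inl h)
      · rcases List.mem_cons.mp hn with rfl | hn
        exacts [Or.inl (Or.inr hc), Or.inr ⟨n, hn, hc⟩]

-- find? over a key-indexed map
theorem pv_find?_map_key (l : List String) (f : String → List String) (t : String) :
    List.find? (fun pr => pr.1 == t) (l.map (fun t' => (t', f t'))) =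
      if t ∈ l then some (t, f t) else none := by
  induction l with
  | nil => simp
  | cons a l ih =>
    by_cases ha : a = t
    · subst ha; simp
    · rw [List.map_cons, List.find?_cons_of_neg (by simp [ha]), ih]
      have hta : ¬ t = a := fun h => ha h.symm
      by_cases htl : t ∈ l <;> simp [htl, hta]

theorem pv_any_map_key (l : List String) (f : String → List String) (t : String) :
    (l.map (fun t' => (t', f t'))).any (fun pr => pr.1 == t) = decide (t ∈ l) := by
  induction l with
  | nil => simp
  | cons a l ih =>
    by_cases ha : a = t
    · subst ha; simp
    · rw [List.map_cons, List.any_cons, ih]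
      have h1 : ((a, f a).1 == t) = false := by simp [ha]
      have h2 : decide (t ∈ a :: l) = decide (t ∈ l) := by
        have hta : ¬ t = a := fun h => ha h.symm
        simp [List.mem_cons, hta]
      rw [h1, h2, Bool.false_or]

-- foldl of Set.add over a list that stays Nodup is plain append
theorem pv_foldl_add_nodup (xs : List String) : ∀ (acc : List String),
    (acc ++ xs).Nodup → xs.foldl PySem.Set.add acc = acc ++ xs := by
  induction xs with
  | nil => simp
  | cons x xs ih =>
    intro acc h
    have hx : x ∉ acc := fun hmem =>
      (List.nodup_append.mp h).2.2 x hmem x (List.mem_cons_self ..) rfl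
    have hc : PySem.Set.add acc x = acc ++ [x] := by
      simp [PySem.Set.add, PySem.Set.contains, List.contains_eq_mem, hx]
    rw [List.foldl_cons, hc, ih (acc ++ [x]) (by simpa using h)]
    simp

theorem pv_ofList_nodup (xs : List String) (h : xs.Nodup) : PySem.Set.ofList xs = xs := by
  simpa [PySem.Set.ofList, PySem.Set.empty] using pv_foldl_add_nodup xs [] (by simpa using h)

-- the table pvTable p: B's result computed from the processed prefix p of the keys
def pvTable (p : List String) : List (String × List String) :=
  (p.foldl pvStepOrder []).map (fun t => (t, p.filter (fun n => pvClassify n == t)))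

-- one A-step advances the table by one key
theorem pv_stepA_table (p : List String) (n : String) (hn : n ∉ p) :
    pvStepA (PySem.Dict.mk (pvTable p)) n = PySem.Dict.mk (pvTable (p ++ [n])) := by
  have horder : (p ++ [n]).foldl pvStepOrder [] = pvStepOrder (p.foldl pvStepOrder []) n := by
    rw [List.foldl_append]; rfl
  set t := pvClassify n with ht
  set O := p.foldl pvStepOrder [] with hO
  have hfilter : ∀ t', (p ++ [n]).filter (fun m => pvClassify m == t') =
      p.filter (fun m => pvClassify m == t') ++ (if t = t' then [n] else []) := by
    intro t'
    rw [List.filter_append]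
    by_cases h : t = t'
    · subst h; simp [← ht]
    · simp [← ht, h]
  by_cases hmem : t ∈ O
  · -- bucket already exists: dict unchanged, then the name is appended to the bucket
    have hcont : (PySem.Dict.mk (pvTable p)).contains t = true := by
      unfold PySem.Dict.contains pvTable
      rw [← hO, pv_any_map_key]
      simp [hmem]
    have hget : (PySem.Dict.mk (pvTable p)).get? t =
        some (p.filter (fun m => pvClassify m == t)) := by
      unfold PySem.Dict.get? pvTable
      rw [← hO, pv_find?_map_key, if_pos hmem]
      rfl
    have hnin : n ∉ p.filter (fun m => pvClassify m == t) := fun h => hn (List.mem_of_mem_filter h)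
    simp only [pvStepA, pvClassifyA_eq, ← ht, if_true, PySem.Dict.modify,
      PySem.Dict.getD, hget, Option.getD_some, PySem.Dict.insert, hcont, PySem.Set.add]
    unfold pvTable
    rw [horder]
    have hstep : pvStepOrder O n = O := by
      simp [pvStepOrder, ← ht, List.contains_eq_mem, hmem]
    rw [hstep, ← hO]
    congr 1
    rw [List.map_map]
    apply List.map_congr_left
    intro t' _
    by_cases h : t' = t
    · subst h
      simp [Function.comp, hfilter, PySem.Set.contains]
      exact fun hm _ => hn hm
    · have hne : ¬ t = t' := fun hh => h hh.symm
      simp [Function.comp, h, hfilter, hne]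
  · -- new bucket: an empty set is inserted at the end, then the name added to it
    have hcont : (PySem.Dict.mk (pvTable p)).contains t = false := by
      unfold PySem.Dict.contains pvTable
      rw [← hO, pv_any_map_key]
      simp [hmem]
    have hfind : List.find? (fun pr => pr.1 == t) (pvTable p) = none := by
      unfold pvTable
      rw [← hO, pv_find?_map_key, if_neg hmem]
    have hpfilter : p.filter (fun m => pvClassify m == t) = [] := by
      rw [List.filter_eq_nil_iff]
      intro m hm hc
      exact hmem ((pv_mem_foldl_order p [] t).mpr (Or.inr ⟨m, hm, by simpa using hc⟩))
    -- after inserting (t, ∅) the dict contains t, get? t = ∅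
    have hcont2 : (PySem.Dict.mk (pvTable p ++ [(t, ([] : List String))])).contains t = true := by
      simp [PySem.Dict.contains]
    have hget2 : (PySem.Dict.mk (pvTable p ++ [(t, ([] : List String))])).get? t =
        some ([] : List String) := by
      simp [PySem.Dict.get?, List.find?_append, hfind, List.find?]
    simp only [pvStepA, pvClassifyA_eq, ← ht, Bool.false_eq_true, if_false,
      PySem.Dict.insert, hcont, PySem.Set.empty, PySem.Dict.modify, PySem.Dict.getD,
      hget2, Option.getD_some, hcont2, if_true, PySem.Set.add, List.nil_append]
    unfold pvTable
    rw [horder]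
    have hstep : pvStepOrder O n = O ++ [t] := by
      simp [pvStepOrder, ← ht, List.contains_eq_mem, hmem]
    rw [hstep, ← hO]
    congr 1
    rw [List.map_append, List.map_map, List.map_append]
    congr 1
    · apply List.map_congr_left
      intro t' ht'
      have h : t' ≠ t := fun hh => hmem (hh ▸ ht')
      have hne : ¬ t = t' := fun hh => h hh.symm
      simp [Function.comp, h, hfilter, hne]
    · simp [PySem.Set.contains, hfilter, hpfilter]

theorem pv_foldA_eq (p : List String) (h : p.Nodup) :
    p.foldl pvStepA (PySem.Dict.mk []) = PySem.Dict.mk (pvTable p) := by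
  induction p using List.reverseRecOn with
  | nil => rfl
  | append_singleton p n ih =>
    rcases List.nodup_append.mp h with ⟨hp, -, hdisj⟩
    have hn : n ∉ p := fun hm => hdisj n hm n (List.mem_cons_self ..) rfl
    rw [List.foldl_append, ih hp]
    exact pv_stepA_table p n hn

-- ===== VERDICT (by name: the statement is the Claim_ definition above) =====
theorem extract_entities_by_type_spec : Claim_equal_extract_entities_by_type := by
  intro entity2id _
  unfold Spec_extract_entities_by_type extract_entities_by_type extract_entities_by_type_alt
  set names := PySem.List.dedup (entity2id.map (fun p => p.1)) with hnames
  have hnodup : names.Nodup := PySem.Set.nodup_ofList _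
  rw [pv_foldA_eq names hnodup]
  unfold pvTable
  have hset : ∀ t, PySem.Set.ofList (names.filter (fun n => pvClassify n == t)) =
      names.filter (fun n => pvClassify n == t) := fun t =>
    pv_ofList_nodup _ (hnodup.filter _)
  simp only [hset]
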